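-- pv_equiv track=rewrite | github.com/ckswls56/BaejoonHub | 백준/Silver/1652. 누울 자리를 찾아라/누울 자리를 찾아라.py | check
-- ===== SOURCE A (Python) =====
-- def check(arr):
--     ret = 0
--     cnt = 0
--     for a in arr:
--         if a == '.':
--             cnt += 1
--         else :
--             cnt = 0
--
--         if cnt == 2:
--             ret += 1
--
--     return ret
-- ===== SOURCE B (Python) =====
-- def check(arr):
--     # Scan maximal runs of '.' and count each run of length >= 2 once.
--     ret = 0
--     i = 0
--     n = len(arr)
--     while i < n:
--         if arr[i] == '.':
--             j = i + 1
--             while j < n and arr[j] == '.':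
--                 j += 1
--             if j - i >= 2:
--                 ret += 1
--             i = j
--         else:
--             i += 1
--     return ret
-- ===== Notes on version B (the rewrite author's own statement) =====
-- stated objective: alternative
-- what changed: B scans maximal runs of '.' explicitly (inner loop skipping the whole run, +1 per run of length >= 2) instead of threading a per-element counter that fires at cnt==2.
import Mathlib
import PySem

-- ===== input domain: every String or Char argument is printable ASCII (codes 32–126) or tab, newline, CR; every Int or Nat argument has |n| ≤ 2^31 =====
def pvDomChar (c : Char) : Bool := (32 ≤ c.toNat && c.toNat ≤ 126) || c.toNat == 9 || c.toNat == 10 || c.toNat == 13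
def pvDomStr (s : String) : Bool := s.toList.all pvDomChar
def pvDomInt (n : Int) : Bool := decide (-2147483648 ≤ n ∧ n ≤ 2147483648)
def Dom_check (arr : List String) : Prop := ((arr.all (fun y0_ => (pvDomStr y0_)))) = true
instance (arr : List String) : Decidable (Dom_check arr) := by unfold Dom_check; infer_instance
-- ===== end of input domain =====

-- B scans maximal runs of '.' (skipping each whole run, +1 per run of length ≥ 2) instead of A's per-element counter firing at cnt == 2; same cost, different decomposition.

-- ===== PORT A =====
def checkStep (s : Int × Int) (a : String) : Int × Int :=
  let cnt := if a = "." then s.2 + 1 else 0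
  let ret := if cnt = 2 then s.1 + 1 else s.1
  (ret, cnt)

def check (arr : List String) : Int :=
  (arr.foldl checkStep (0, 0)).1

-- ===== PORT B =====
-- B's outer while loop as recursion on the list; B's inner run-skipping while loop is the
-- takeWhile/dropWhile of the leading '.'-run (j - i = 1 + run length)
def checkAltGo : List String → Int
  | [] => 0
  | a :: t =>
    if a = "." then
      (if 1 + (t.takeWhile (fun x => x == ".")).length ≥ 2 then (1 : Int) else 0)
        + checkAltGo (t.dropWhile (fun x => x == "."))
    else
      checkAltGo t
termination_by l => l.length
decreasing_by
  · exact Nat.lt_succ_of_le (t.length_dropWhile_le _)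
  · exact Nat.lt_succ_self _

def check_alt (arr : List String) : Int := checkAltGo arr

-- ===== PRECONDITION & SPEC =====
def Spec_check (arr : List String) (out : Int) : Prop := out = check_alt arr
instance (arr : List String) (out : Int) : Decidable (Spec_check arr out) := by unfold Spec_check; infer_instance

-- ===== CLAIM (what is proved, stated in full; the proofs are below) =====
def Claim_equal_check : Prop := ∀ (arr : List String), Dom_check arr → Spec_check arr (check arr)

-- ===== LEMMAS AND PROOFS =====

theorem checkStep_nondot (r c : Int) (a : String) (h : a ≠ ".") :
    checkStep (r, c) a = (r, 0) := by
  simp [checkStep, h]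

theorem fold_dots (run : List String) (r c : Int) (hall : ∀ x ∈ run, x = ".") (hc : 1 ≤ c) :
    run.foldl checkStep (r, c) =
      (r + (if c = 1 ∧ run ≠ [] then 1 else 0), c + run.length) := by
  induction run generalizing r c with
  | nil => simp
  | cons x xs ih =>
    have hx : x = "." := hall x (by simp)
    have hxs : ∀ y ∈ xs, y = "." := fun y hy => hall y (by simp [hy])
    by_cases h1 : c = 1
    · subst h1
      have hs : checkStep (r, 1) x = (r + 1, 2) := by simp [checkStep, hx]
      rw [List.foldl_cons, hs, ih (r + 1) 2 hxs (by omega)]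
      simp
      omega
    · have hne : c + 1 ≠ 2 := by omega
      have hs : checkStep (r, c) x = (r, c + 1) := by simp [checkStep, hx, hne]
      rw [List.foldl_cons, hs, ih r (c + 1) hxs (by omega)]
      have h2 : ¬ (c + 1 = 1) := by omega
      simp [h1, h2]
      omega

theorem main_lemma : ∀ (arr : List String) (r : Int),
    (arr.foldl checkStep (r, 0)).1 = r + checkAltGo arr := by
  intro arr
  induction arr using checkAltGo.induct with
  | case1 => simp [checkAltGo]
  | case2 t ih =>
    intro r
    have hstep : checkStep (r, 0) "." = (r, 1) := by simp [checkStep]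
    have hall : ∀ x ∈ t.takeWhile (fun x => x == "."), x = "." := by
      intro x hx
      have := List.mem_takeWhile_imp hx
      simpa using this
    have hgo : checkAltGo ("." :: t)
        = (if 1 + (t.takeWhile (fun x => x == ".")).length ≥ 2 then (1 : Int) else 0)
            + checkAltGo (t.dropWhile (fun x => x == ".")) := by
      rw [checkAltGo]
      simp
    have ht : t.takeWhile (fun x => x == ".") ++ t.dropWhile (fun x => x == ".") = t :=
      List.takeWhile_append_dropWhile
    rw [List.foldl_cons, hstep, hgo]
    conv_lhs => rw [← ht]
    rw [List.foldl_append, fold_dots _ r 1 hall (by norm_num)]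
    rcases hr : t.dropWhile (fun x => x == ".") with _ | ⟨b, bs⟩
    · simp only [List.foldl_nil, checkAltGo, add_zero]
      by_cases hrn : t.takeWhile (fun x => x == ".") = []
      · simp [hrn]
      · rcases List.exists_cons_of_ne_nil hrn with ⟨u, us, hu⟩
        simp [hu]
    · have hb : b ≠ "." := by
        have := List.head?_dropWhile_not (p := fun x => x == ".") (l := t)
        rw [hr] at this
        simpa using this
      have ihb := ih (r + (if (1:Int) = 1 ∧ t.takeWhile (fun x => x == ".") ≠ [] then 1 else 0))
      rw [hr] at ihb
      rw [List.foldl_cons, checkStep_nondot _ _ _ hb] at ihb ⊢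
      rw [ihb]
      by_cases hrn : t.takeWhile (fun x => x == ".") = []
      · simp [hrn]
      · rcases List.exists_cons_of_ne_nil hrn with ⟨u, us, hu⟩
        simp [hu]
        rw [if_pos (by omega)]
        ring
  | case3 a t ha ih =>
    intro r
    rw [List.foldl_cons, checkStep_nondot _ _ _ ha, ih]
    have : checkAltGo (a :: t) = checkAltGo t := by
      rw [checkAltGo]; simp [ha]
    rw [this]

-- ===== VERDICT (by name: the statement is the Claim_ definition above) =====
theorem check_spec : Claim_equal_check := by
  intro arr _
  unfold Spec_check check check_alt
  simpa using main_lemma arr 0
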